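-- pv_equiv track=rewrite | github.com/Djangowon/PS | programmers/12940.py | solution
-- ===== SOURCE A (Python) =====
-- def solution(n, m):
--     answer = []
--
--     for i in range(min(n, m), 0, -1):
--         if n % m == 0 and m % n == 0:
--             answer.append(i)
--             pass
--
--     for i in range(max(n, m), (n*m)+1):
--         if i % n == 0 and i % m == 0:
--             answer.append(i)
--             pass
--
--     return answer
-- ===== SOURCE B (Python) =====
-- def solution(n, m):
--     # Common multiples of n and m in [max(n, m), n*m], enumerated directly as
--     # multiples of lcm(|n|, |m|) instead of scanning every integer in the range.
--     if n == 0 or m == 0: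
--         return []
--     a, b = abs(n), abs(m)
--     while b:
--         a, b = b, a % b
--     L = abs(n * m) // a              # lcm(|n|, |m|)
--     lo, hi = max(n, m), n * m
--     start = -((-lo) // L) * L        # smallest multiple of L that is >= lo
--     return list(range(start, hi + 1, L))
-- ===== Notes on version B (the rewrite author's own statement) =====
-- stated objective: faster
-- what changed: B computes lcm(|n|,|m|) with Euclid's algorithm and enumerates the multiples of the lcm in [max(n,m), n*m] directly with a stepped range, instead of A's scan of every integer in that interval with two modulus tests (and without A's leftover first loop).
-- intended difference: When n = m >= 1, A's first loop condition n%m==0 and m%n==0 is always true so A prepends the descending list n..1 (a leftover buggy loop) before the common multiples; B returns only the common multiples of n and m in [max(n,m), n*m], which is the intended value. — e.g. on solution(2, 2): A returns [2, 1, 2, 4], B returns [2, 4]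
import Mathlib
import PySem

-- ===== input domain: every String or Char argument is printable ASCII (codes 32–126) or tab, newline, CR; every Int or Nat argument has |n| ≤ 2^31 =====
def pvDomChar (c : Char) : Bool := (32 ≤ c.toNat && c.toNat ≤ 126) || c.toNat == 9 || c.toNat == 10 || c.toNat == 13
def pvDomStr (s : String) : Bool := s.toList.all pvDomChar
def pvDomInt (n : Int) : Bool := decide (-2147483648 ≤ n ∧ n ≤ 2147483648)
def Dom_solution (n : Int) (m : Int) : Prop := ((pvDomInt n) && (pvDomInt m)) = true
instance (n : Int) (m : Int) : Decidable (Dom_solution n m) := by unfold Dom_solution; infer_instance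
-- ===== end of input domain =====

-- B replaces A's O(n*m) scan of [max(n,m), n*m] by direct enumeration of the multiples of
-- lcm(|n|,|m|) (Euclid's algorithm); on n = m ≥ 1 A's first loop wrongly prepends n..1 (D_ below).


-- ===== PORT A =====
def solution (n : Int) (m : Int) : List Int :=
  let answer : List Int :=
    (PySem.List.pyRange (min n m) 0 (-1)).foldl
      (fun acc i => if PySem.Int.mod n m = 0 ∧ PySem.Int.mod m n = 0 then acc ++ [i] else acc) []
  (PySem.List.pyRange (max n m) (n * m + 1) 1).foldl
    (fun acc i => if PySem.Int.mod i n = 0 ∧ PySem.Int.mod i m = 0 then acc ++ [i] else acc) answer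

-- ===== PORT B =====
-- Source B's while-loop Euclid on the absolute values (fuel = b + 1 iterations always suffice,
-- since the second argument strictly decreases; the fuel only makes the recursion structural)
def euclidFuel : Nat -> Nat -> Nat -> Nat
  | 0, a, _ => a
  | f + 1, a, b => if b = 0 then a else euclidFuel f b (a % b)

def euclid (a b : Nat) : Nat := euclidFuel (b + 1) a b

def solution_alt (n : Int) (m : Int) : List Int :=
  if n = 0 ∨ m = 0 then []
  else
    let L : Int := PySem.Int.floordiv |n * m| (euclid n.natAbs m.natAbs : Nat)
    let lo : Int := max n m
    let hi : Int := n * m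
    let start : Int := -(PySem.Int.floordiv (-lo) L) * L
    PySem.List.pyRange start (hi + 1) L

-- ===== PRECONDITION & SPEC =====
-- Pre_ excludes exactly the inputs where A raises ZeroDivisionError ('i % 0' / '% n' with n = 0):
-- n = 0 with m ≤ 0, or m = 0 with n ≤ 0 (for those the raising range is nonempty).
def Pre_solution (n : Int) (m : Int) : Prop := ¬(n = 0 ∧ m ≤ 0) ∧ ¬(m = 0 ∧ n ≤ 0)
instance (n : Int) (m : Int) : Decidable (Pre_solution n m) := by unfold Pre_solution; infer_instance
def pvWitness_solution : Int × Int := (4, 6)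

-- When n = m ≥ 1 the first loop's condition is always true, so A wrongly prepends the descending
-- list n..1 (leftover debug loop) before the common multiples; B returns only the common multiples
-- of n and m in [max(n,m), n*m], which is the intended value.
def D_solution (n : Int) (m : Int) : Prop := n = m ∧ 1 ≤ n
instance (n : Int) (m : Int) : Decidable (D_solution n m) := by unfold D_solution; infer_instance

def Spec_solution (n : Int) (m : Int) (out : List Int) : Prop := ¬ D_solution n m → out = solution_alt n m
instance (n : Int) (m : Int) (out : List Int) : Decidable (Spec_solution n m out) := by unfold Spec_solution; infer_instance

def pvDiffWitness_solution : Int × Int := (2, 2)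
def pvDiffWitnessOut_solution : (List Int) × (List Int) := ([2, 1, 2, 4], [2, 4])

-- ===== CLAIM (what is proved, stated in full; the proofs are below) =====
def Claim_unchanged_solution : Prop := ∀ (n : Int) (m : Int), Dom_solution n m → Pre_solution n m → Spec_solution n m (solution n m)
def Claim_changed_solution : Prop := Dom_solution (pvDiffWitness_solution.1) (pvDiffWitness_solution.2) ∧ Pre_solution (pvDiffWitness_solution.1) (pvDiffWitness_solution.2) ∧ D_solution (pvDiffWitness_solution.1) (pvDiffWitness_solution.2) ∧ solution (pvDiffWitness_solution.1) (pvDiffWitness_solution.2) = pvDiffWitnessOut_solution.1 ∧ solution_alt (pvDiffWitness_solution.1) (pvDiffWitness_solution.2) = pvDiffWitnessOut_solution.2 ∧ pvDiffWitnessOut_solution.1 ≠ pvDiffWitnessOut_solution.2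
def Claim_exact_solution : Prop := ∀ (n : Int) (m : Int), Dom_solution n m → Pre_solution n m → D_solution n m → solution n m ≠ solution_alt n m

-- ===== LEMMAS AND PROOFS =====

lemma euclidFuel_eq_gcd : ∀ (f a b : Nat), b < f → euclidFuel f a b = Nat.gcd a b
  | 0, _, _, h => absurd h (by omega)
  | f + 1, a, b, h => by
    rw [euclidFuel]
    split
    · simp [*]
    · next hb =>
      rw [euclidFuel_eq_gcd f b (a % b) (by have := Nat.mod_lt a (Nat.pos_of_ne_zero hb); omega),
          Nat.gcd_comm, ← Nat.gcd_rec, Nat.gcd_comm]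

lemma euclid_eq_gcd (a b : Nat) : euclid a b = Nat.gcd a b :=
  euclidFuel_eq_gcd (b + 1) a b (by omega)

lemma pyRange_pos_nil {a b s : Int} (hs : 0 < s) (h : b ≤ a) : PySem.List.pyRange a b s = [] := by
  rw [PySem.List.pyRange_of_pos _ _ hs, if_neg (by omega)]
  simp

lemma pyRange_pos_cons {a b s : Int} (hs : 0 < s) (h : a < b) :
    PySem.List.pyRange a b s = a :: PySem.List.pyRange (a + s) b s := by
  rw [PySem.List.pyRange_of_pos _ _ hs, PySem.List.pyRange_of_pos _ _ hs, if_pos h]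
  have h1 : (b - a + s - 1) / s = (b - a - 1) / s + 1 := by
    rw [show b - a + s - 1 = b - a - 1 + 1 * s by ring,
        Int.add_mul_ediv_right _ _ (by omega : s ≠ 0)]
  have h0 : 0 ≤ (b - a - 1) / s := Int.ediv_nonneg (by omega) (by omega)
  have h2 : ((b - a + s - 1) / s).toNat = ((b - a - 1) / s).toNat + 1 := by omega
  have h3 : (if a + s < b then ((b - (a + s) + s - 1) / s).toNat else 0)
      = ((b - a - 1) / s).toNat := by
    split
    · congr 2; ring
    · next hnb =>
      have : (b - a - 1) / s = 0 := Int.ediv_eq_zero_of_lt (by omega) (by omega)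
      omega
  rw [h2, h3, List.range_succ_eq_map]
  simp only [List.map_cons, List.map_map, Nat.cast_zero, mul_zero, add_zero, List.cons.injEq,
    true_and]
  apply List.map_congr_left
  intro k _
  simp [Function.comp]
  ring

-- B's start value is the least multiple of L that is ≥ lo, characterized by brackets.
lemma filter_range_dvd (L : Int) (hL : 0 < L) (hi : Int) : ∀ (k : Nat) (lo : Int), (hi - lo).toNat = k →
    (PySem.List.pyRange lo hi 1).filter (fun i => decide (L ∣ i)) =
      PySem.List.pyRange (-(PySem.Int.floordiv (-lo) L) * L) hi L := by
  intro k
  induction k with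
  | zero =>
    intro lo hk
    have hle : hi ≤ lo := by omega
    have hbr := (PySem.Int.neg_floordiv_neg_eq_iff_of_pos (a := lo) hL).mp rfl
    rw [PySem.List.pyRange_one_eq_nil hle, pyRange_pos_nil hL (le_trans hle hbr.2)]
    simp
  | succ k ih =>
    intro lo hk
    have hlt : lo < hi := by omega
    set q : Int := -PySem.Int.floordiv (-lo) L with hq
    have hbr := (PySem.Int.neg_floordiv_neg_eq_iff_of_pos (a := lo) hL).mp rfl
    rw [← hq] at hbr
    rw [PySem.List.pyRange_one_cons hlt, List.filter_cons]
    by_cases hdvd : L ∣ lo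
    · obtain ⟨c, hc⟩ := hdvd
      have hqc : q = c := by
        have h1 : (q - 1) * L < c * L := by rw [mul_comm c L, ← hc]; exact hbr.1
        have h2 : c * L ≤ q * L := by rw [mul_comm c L, ← hc]; exact hbr.2
        nlinarith
      have hstart : q * L = lo := by rw [hqc, hc, mul_comm]
      have hnext : -PySem.Int.floordiv (-(lo + 1)) L = q + 1 :=
        (PySem.Int.neg_floordiv_neg_eq_iff_of_pos hL).mpr
          (by constructor <;> nlinarith [hstart])
      rw [if_pos (by simpa using ⟨c, hc⟩), ih (lo + 1) (by omega), hnext,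
          show (q + 1) * L = lo + L by rw [add_mul, one_mul, hstart], hstart,
          pyRange_pos_cons hL hlt]
    · have hne : lo ≠ q * L := by
        intro h; exact hdvd ⟨q, by rw [h, mul_comm]⟩
      have hnext : -PySem.Int.floordiv (-(lo + 1)) L = q :=
        (PySem.Int.neg_floordiv_neg_eq_iff_of_pos hL).mpr
          ⟨by nlinarith [hbr.1], by rcases lt_or_eq_of_le hbr.2 with h | h; omega; exact absurd h hne⟩
      rw [if_neg (by simpa using hdvd), ih (lo + 1) (by omega), hnext]

-- the value of solution as (constant-condition first loop) ++ (filtered range)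
lemma solution_eq (n m : Int) :
    solution n m =
      ((PySem.List.pyRange (min n m) 0 (-1)).filter
        (fun _ => decide (PySem.Int.mod n m = 0 ∧ PySem.Int.mod m n = 0))) ++
      ((PySem.List.pyRange (max n m) (n * m + 1) 1).filter
        (fun i => decide (PySem.Int.mod i n = 0 ∧ PySem.Int.mod i m = 0))) := by
  show List.foldl _ (List.foldl _ [] _) _ = _
  rw [PySem.List.foldl_append_ite_eq_filter (fun i => PySem.Int.mod n m = 0 ∧ PySem.Int.mod m n = 0),
      PySem.List.foldl_append_ite_eq_filter (fun i => PySem.Int.mod i n = 0 ∧ PySem.Int.mod i m = 0)]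
  simp

lemma lcm_val (n m : Int) :
    PySem.Int.floordiv |n * m| (euclid n.natAbs m.natAbs : Nat) = (Nat.lcm n.natAbs m.natAbs : Int) := by
  rw [euclid_eq_gcd, Int.abs_eq_natAbs, Int.natAbs_mul, PySem.Int.floordiv_natCast, Nat.lcm]

lemma dvd_iff (n m i : Int) :
    (PySem.Int.mod i n = 0 ∧ PySem.Int.mod i m = 0) ↔ ((Nat.lcm n.natAbs m.natAbs : Int) ∣ i) := by
  rw [PySem.Int.mod_eq_zero_iff_dvd, PySem.Int.mod_eq_zero_iff_dvd, Int.ofNat_dvd_left,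
      Nat.lcm_dvd_iff, ← Int.ofNat_dvd_left, ← Int.ofNat_dvd_left, Int.natAbs_dvd, Int.natAbs_dvd]

-- the second loop of A computes exactly B's list, whenever n, m ≠ 0
lemma second_eq (n m : Int) (hn : n ≠ 0) (hm : m ≠ 0) :
    (PySem.List.pyRange (max n m) (n * m + 1) 1).filter
        (fun i => decide (PySem.Int.mod i n = 0 ∧ PySem.Int.mod i m = 0)) =
      solution_alt n m := by
  have hL : 0 < (Nat.lcm n.natAbs m.natAbs : Int) := by
    have := Nat.lcm_ne_zero (Int.natAbs_ne_zero.mpr hn) (Int.natAbs_ne_zero.mpr hm)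
    omega
  have hpred : (fun i => decide (PySem.Int.mod i n = 0 ∧ PySem.Int.mod i m = 0))
      = (fun i => decide ((Nat.lcm n.natAbs m.natAbs : Int) ∣ i)) := by
    funext i; exact decide_eq_decide.mpr (dvd_iff n m i)
  rw [hpred, filter_range_dvd _ hL (n * m + 1) ((n * m + 1 - max n m).toNat) (max n m) rfl]
  rw [solution_alt, if_neg (by tauto)]
  rw [lcm_val]

theorem main_eq (n m : Int) (hpre : Pre_solution n m) (hnd : ¬ D_solution n m) :
    solution n m = solution_alt n m := by
  obtain ⟨hp1, hp2⟩ := hpre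
  by_cases hn : n = 0
  · have hm1 : 1 ≤ m := by by_contra h; exact hp1 ⟨hn, by omega⟩
    subst hn
    rw [solution_eq, solution_alt, if_pos (Or.inl rfl)]
    rw [min_eq_left (by omega), max_eq_right (by omega), zero_mul,
        PySem.List.pyRange_neg_one_eq_nil le_rfl, PySem.List.pyRange_one_eq_nil (by omega)]
    simp
  by_cases hm : m = 0
  · have hn1 : 1 ≤ n := by by_contra h; exact hp2 ⟨hm, by omega⟩
    subst hm
    rw [solution_eq, solution_alt, if_pos (Or.inr rfl)]
    rw [min_eq_right (by omega), max_eq_left (by omega), mul_zero,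
        PySem.List.pyRange_neg_one_eq_nil le_rfl, PySem.List.pyRange_one_eq_nil (by omega)]
    simp
  · rw [solution_eq, second_eq n m hn hm]
    suffices h : (PySem.List.pyRange (min n m) 0 (-1)).filter
        (fun _ => decide (PySem.Int.mod n m = 0 ∧ PySem.Int.mod m n = 0)) = [] by
      rw [h, List.nil_append]
    by_cases hc : PySem.Int.mod n m = 0 ∧ PySem.Int.mod m n = 0
    · -- mutual divisibility: |n| = |m|, and with ¬D_ the first range is empty
      have hd1 : m ∣ n := (PySem.Int.mod_eq_zero_iff_dvd n m).mp hc.1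
      have hd2 : n ∣ m := (PySem.Int.mod_eq_zero_iff_dvd m n).mp hc.2
      have habs : n.natAbs = m.natAbs :=
        Nat.dvd_antisymm (Int.natAbs_dvd_natAbs.mpr hd2) (Int.natAbs_dvd_natAbs.mpr hd1)
      have hcase : n = m ∨ n = -m := Int.natAbs_eq_natAbs_iff.mp habs
      have hmin : min n m ≤ 0 := by
        rcases hcase with h | h
        · subst h
          have : ¬(1 ≤ n) := fun h1 => hnd ⟨rfl, h1⟩
          omega
        · subst h
          by_cases h : m ≤ 0
          · exact le_trans (min_le_right _ _) h
          · exact le_trans (min_le_left _ _) (by omega)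
      rw [PySem.List.pyRange_neg_one_eq_nil hmin]
      simp
    · simp only [decide_eq_false hc]
      exact List.filter_false _

-- ===== VERDICT (by name: the statement is the Claim_ definition above) =====
theorem solution_spec : Claim_unchanged_solution := by
  intro n m _ hpre hnd
  exact main_eq n m hpre hnd

theorem solution_changed : Claim_changed_solution := by
  unfold Claim_changed_solution; decide

theorem solution_tight : Claim_exact_solution := by
  intro n m _ hpre hd heq
  obtain ⟨rfl, hpos⟩ : n = m ∧ 1 ≤ n := hd
  have hn : n ≠ 0 := by omega
  have hc : PySem.Int.mod n n = 0 ∧ PySem.Int.mod n n = 0 := by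
    constructor <;> exact (PySem.Int.mod_eq_zero_iff_dvd n n).mpr dvd_rfl
  have hA : solution n n = PySem.List.pyRange n 0 (-1) ++ solution_alt n n := by
    rw [solution_eq, second_eq n n hn hn, min_self]
    congr 1
    simp only [decide_eq_true hc]
    exact List.filter_true _
  have hne : PySem.List.pyRange n 0 (-1) ≠ [] := by
    rw [PySem.List.pyRange_neg_one_cons (by omega : (0:Int) < n)]
    simp
  rw [hA] at heq
  have := congrArg List.length heq
  simp only [List.length_append] at this
  have : (PySem.List.pyRange n 0 (-1)).length = 0 := by omega
  exact hne (List.length_eq_zero_iff.mp this)
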